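-- pv_equiv track=rewrite | github.com/MarkAnthonyKoop/cc_atoms | src/cc_atoms/tools/elysia_sync/context_hook.py | format_context_block
-- ===== SOURCE A (Python) =====
-- from typing import Optional, Dict, Any, List
--
-- def format_context_block(
--
--     documents: List[Dict[str, Any]],
--     max_length: int = 3000
-- ) -> str:
--     """
--     Format a list of documents into a context block.
--
--     Args:
--         documents: List of documents from query_elysia
--         max_length: Maximum total length
--
--     Returns:
--         Formatted context string
--     """
--     if not documents:
--         return ""
--
--     parts = ["## Background Context\n"]
--     current_length = len(parts[0])
--
--     for doc in documents:
--         content = doc.get('content', '')[:500]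
--         source = doc.get('source', 'unknown')
--         doc_type = doc.get('type', 'unknown')
--
--         block = f"\n**[{doc_type}]** {source}\n{content}\n"
--
--         if current_length + len(block) > max_length:
--             break
--
--         parts.append(block)
--         current_length += len(block)
--
--     parts.append("\n---\n")
--     return ''.join(parts)
-- ===== SOURCE B (Python) =====
-- def format_context_block(documents, max_length=3000):
--     if not documents:
--         return ""
--     header = "## Background Context\n"
--     blocks = [
--         "\n**[{}]** {}\n{}\n".format(
--             d.get('type', 'unknown'), d.get('source', 'unknown'), d.get('content', '')[:500])
--         for d in documents
--     ]
--     totals = [len(header)]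
--     for b in blocks:
--         totals.append(totals[-1] + len(b))
--     n = 0
--     while n < len(blocks) and totals[n + 1] <= max_length:
--         n += 1
--     return header + ''.join(blocks[:n]) + "\n---\n"
-- ===== Notes on version B (the rewrite author's own statement) =====
-- stated objective: alternative
-- what changed: Replaces the single accumulate-and-break loop with a three-stage pipeline: map every document to its block string, compute prefix sums of the block lengths seeded with the header length, then join the longest prefix whose running total stays within max_length.
import Mathlib
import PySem

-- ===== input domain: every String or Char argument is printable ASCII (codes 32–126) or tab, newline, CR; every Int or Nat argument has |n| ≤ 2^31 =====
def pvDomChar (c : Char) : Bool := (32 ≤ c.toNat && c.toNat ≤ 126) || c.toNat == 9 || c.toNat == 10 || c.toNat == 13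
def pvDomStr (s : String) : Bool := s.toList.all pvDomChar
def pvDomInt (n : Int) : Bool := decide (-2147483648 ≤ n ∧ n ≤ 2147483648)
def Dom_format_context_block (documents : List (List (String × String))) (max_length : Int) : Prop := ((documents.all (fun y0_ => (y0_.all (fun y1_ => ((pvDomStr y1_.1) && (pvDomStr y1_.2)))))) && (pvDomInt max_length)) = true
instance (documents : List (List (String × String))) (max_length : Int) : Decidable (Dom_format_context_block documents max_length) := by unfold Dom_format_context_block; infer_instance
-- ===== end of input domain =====

-- B restructures A's accumulate-and-break loop into a map / prefix-sum / count pipeline; objective: alternative decomposition (same cost).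

-- ===== PORT A =====
-- doc.get(key, default) on the association list (first match wins)
def pvGetD (doc : List (String × String)) (k dflt : String) : String :=
  match doc.find? (fun p => p.1 == k) with
  | some p => p.2
  | none => dflt

-- A's for-loop with break: returns the appended blocks, threading current_length
def pvLoopA (docs : List (List (String × String))) (max_length : Int) (cur : Int) : List String :=
  match docs with
  | [] => []
  | doc :: rest =>
    let content := PySem.Str.slice (pvGetD doc "content" "") none (some 500)
    let source := pvGetD doc "source" "unknown"
    let doc_type := pvGetD doc "type" "unknown"
    let block := PySem.Str.join "" ["\n**[", doc_type, "]** ", source, "\n", content, "\n"]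
    if cur + PySem.Str.len block > max_length then []
    else block :: pvLoopA rest max_length (cur + PySem.Str.len block)

def format_context_block (documents : List (List (String × String))) (max_length : Int) : String :=
  if documents = [] then ""
  else
    let header := "## Background Context\n"
    PySem.Str.join "" (header :: (pvLoopA documents max_length (PySem.Str.len header) ++ ["\n---\n"]))

-- ===== PORT B =====
def pvBlockOf (d : List (String × String)) : String :=
  PySem.Str.join "" ["\n**[", pvGetD d "type" "unknown", "]** ", pvGetD d "source" "unknown", "\n",
    PySem.Str.slice (pvGetD d "content" "") none (some 500), "\n"]

-- totals: prefix sums of block lengths, seeded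
def pvTotals (seed : Int) (bs : List String) : List Int :=
  match bs with
  | [] => [seed]
  | b :: rest => seed :: pvTotals (seed + PySem.Str.len b) rest

-- the while loop counting how many blocks to keep (totals[n+1] <= max_length)
def pvKeep (bs : List String) (ts : List Int) (max_length : Int) : Nat :=
  match bs, ts with
  | _ :: bs', _ :: t :: ts' => if t ≤ max_length then pvKeep bs' (t :: ts') max_length + 1 else 0
  | _, _ => 0

def format_context_block_alt (documents : List (List (String × String))) (max_length : Int) : String :=
  if documents = [] then ""
  else
    let header := "## Background Context\n"
    let blocks := documents.map pvBlockOf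
    let totals := pvTotals (PySem.Str.len header) blocks
    let n := pvKeep blocks totals max_length
    PySem.Str.join "" [header, PySem.Str.join "" (blocks.take n), "\n---\n"]

-- ===== PRECONDITION & SPEC =====
def Spec_format_context_block (documents : List (List (String × String))) (max_length : Int) (out : String) : Prop := out = format_context_block_alt documents max_length
instance (documents : List (List (String × String))) (max_length : Int) (out : String) : Decidable (Spec_format_context_block documents max_length out) := by unfold Spec_format_context_block; infer_instance

-- ===== CLAIM (what is proved, stated in full; the proofs are below) =====
def Claim_equal_format_context_block : Prop := ∀ (documents : List (List (String × String))) (max_length : Int), Dom_format_context_block documents max_length → Spec_format_context_block documents max_length (format_context_block documents max_length)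

-- ===== LEMMAS AND PROOFS =====

theorem chars_join_nil (l : List (List Char)) : PySem.Chars.join [] l = l.flatten := by
  induction l with
  | nil => simp [PySem.Chars.join, List.intercalate]
  | cons a l ih =>
    cases l with
    | nil => simp [PySem.Chars.join, List.intercalate]
    | cons b l' =>
      rw [PySem.Chars.join_cons_cons, List.flatten_cons, ih]
      simp

theorem pvKeep_cons (b : String) (bs : List String) (c s m : Int) :
    pvKeep (b :: bs) (c :: pvTotals s bs) m
      = if s ≤ m then pvKeep bs (pvTotals s bs) m + 1 else 0 := by
  cases bs <;> rfl

theorem pvLoopA_eq_take (docs : List (List (String × String))) (max_length cur : Int) :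
    pvLoopA docs max_length cur
      = (docs.map pvBlockOf).take (pvKeep (docs.map pvBlockOf) (pvTotals cur (docs.map pvBlockOf)) max_length) := by
  induction docs generalizing cur with
  | nil => rfl
  | cons doc rest ih =>
    simp only [pvLoopA, List.map_cons, pvTotals]
    rw [show (PySem.Str.join "" ["\n**[", pvGetD doc "type" "unknown", "]** ",
          pvGetD doc "source" "unknown", "\n",
          PySem.Str.slice (pvGetD doc "content" "") none (some 500), "\n"]) = pvBlockOf doc from rfl]
    rw [pvKeep_cons (pvBlockOf doc) (rest.map pvBlockOf) cur
          (cur + PySem.Str.len (pvBlockOf doc)) max_length]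
    by_cases h : cur + PySem.Str.len (pvBlockOf doc) ≤ max_length
    · rw [if_neg (by omega), if_pos h, List.take_succ_cons]
      congr 1
      exact ih (cur + PySem.Str.len (pvBlockOf doc))
    · rw [if_pos (by omega), if_neg h]
      simp

-- ===== VERDICT (by name: the statement is the Claim_ definition above) =====
theorem format_context_block_spec : Claim_equal_format_context_block := by
  intro documents max_length _
  unfold Spec_format_context_block format_context_block format_context_block_alt
  by_cases hd : documents = []
  · simp [hd]
  · rw [if_neg hd, if_neg hd]
    dsimp only
    rw [pvLoopA_eq_take]
    apply String.toList_injective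
    simp [chars_join_nil, List.flatten_append]
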